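-- pv_equiv track=rewrite | github.com/abhishekbhadoriya421/DataStructureAlgo | Extract Digits.py | extractDigitsFromAnArrayOptimize
-- ===== SOURCE A (Python) =====
-- def extractDigitsFromAnArrayOptimize(arr):
--     digits = []
--     for num in arr:
--         tempArray = []
--         while num>0 :
--             curDig = num%10
--             tempArray.append(curDig)
--             num = num//10
--         s = 0
--         e = len(tempArray)-1
--         while(s<=e):
--             temp = tempArray[s]
--             tempArray[s] = tempArray[e]
--             tempArray[e] = temp
--             s+=1
--             e-=1
--         digits.extend(tempArray)
--     return digits
-- ===== SOURCE B (Python) =====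
-- def extractDigitsFromAnArrayOptimize(arr):
--     return [int(ch) for num in arr if num > 0 for ch in str(num)]
-- ===== Notes on version B (the rewrite author's own statement) =====
-- stated objective: idiomatic
-- what changed: Replaces the arithmetic mod/floordiv digit loop plus explicit two-pointer in-place reversal with a single flat comprehension that walks the characters of str(num) in order, so no reversed collection and no reversal pass exist at all.
import Mathlib
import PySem

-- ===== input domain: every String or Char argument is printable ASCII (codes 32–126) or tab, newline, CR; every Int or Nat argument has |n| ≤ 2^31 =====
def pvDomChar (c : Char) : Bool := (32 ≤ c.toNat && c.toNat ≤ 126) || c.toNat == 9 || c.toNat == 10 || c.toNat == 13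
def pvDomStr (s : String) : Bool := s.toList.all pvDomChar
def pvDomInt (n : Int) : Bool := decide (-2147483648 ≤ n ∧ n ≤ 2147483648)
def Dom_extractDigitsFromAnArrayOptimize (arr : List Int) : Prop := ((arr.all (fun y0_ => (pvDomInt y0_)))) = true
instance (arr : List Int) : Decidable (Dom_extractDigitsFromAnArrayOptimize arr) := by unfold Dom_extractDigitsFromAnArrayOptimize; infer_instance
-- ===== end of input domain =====

-- B replaces A's mod/floordiv digit loop + explicit two-pointer reversal with one flat
-- comprehension over the characters of str(num) (idiomatic; same asymptotic cost).

-- ===== PORT A =====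
-- 'while num>0: tempArray.append(num%10); num = num//10'
def pvDigitsLoopA (num : Int) (tempArray : List Int) : List Int :=
  if h : 0 < num then
    pvDigitsLoopA (PySem.Int.floordiv num 10) (tempArray ++ [PySem.Int.mod num 10])
  else tempArray
termination_by num.toNat
decreasing_by
  rw [PySem.Int.floordiv_eq_ediv_of_pos (by omega)]
  omega

-- two-pointer in-place reversal 'while s<=e: swap tempArray[s], tempArray[e]'.
-- Indices s, e are always in range when the swap executes, so the total forms
-- pyGetD / pySetD are exact here.
def pvRevLoopA (tempArray : List Int) (s e : Int) : List Int :=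
  if h : s ≤ e then
    let temp := PySem.List.pyGetD tempArray s 0
    let t1 := PySem.List.pySetD tempArray s (PySem.List.pyGetD tempArray e 0)
    let t2 := PySem.List.pySetD t1 e temp
    pvRevLoopA t2 (s + 1) (e - 1)
  else tempArray
termination_by (e - s + 1).toNat
decreasing_by omega

def extractDigitsFromAnArrayOptimize (arr : List Int) : List Int :=
  arr.foldl (fun digits num =>
    let tempArray := pvDigitsLoopA num []
    digits ++ pvRevLoopA tempArray 0 (PySem.List.len tempArray - 1)) []

-- ===== PORT B =====
-- int(ch) for a single character; exact on the decimal digit characters produced by str(num)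
def pvIntOfDigit (c : Char) : Int := (PySem.Int.ofChars? [c]).getD 0

def extractDigitsFromAnArrayOptimize_alt (arr : List Int) : List Int :=
  arr.flatMap (fun num =>
    if 0 < num then (PySem.Int.toChars num).map pvIntOfDigit else [])

-- ===== PRECONDITION & SPEC =====
def Spec_extractDigitsFromAnArrayOptimize (arr : List Int) (out : List Int) : Prop := out = extractDigitsFromAnArrayOptimize_alt arr
instance (arr : List Int) (out : List Int) : Decidable (Spec_extractDigitsFromAnArrayOptimize arr out) := by unfold Spec_extractDigitsFromAnArrayOptimize; infer_instance

-- ===== CLAIM (what is proved, stated in full; the proofs are below) =====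
def Claim_equal_extractDigitsFromAnArrayOptimize : Prop := ∀ (arr : List Int), Dom_extractDigitsFromAnArrayOptimize arr → Spec_extractDigitsFromAnArrayOptimize arr (extractDigitsFromAnArrayOptimize arr)

-- ===== LEMMAS AND PROOFS =====

-- least-significant-first decimal digits of a natural number (specification device)
def pvLsb (n : Nat) : List Nat :=
  if n = 0 then [] else n % 10 :: pvLsb (n / 10)
decreasing_by omega

lemma pvLsb_lt : ∀ (m d : Nat), d ∈ pvLsb m → d < 10 := by
  intro m
  induction m using Nat.strong_induction_on with
  | _ m ihm =>
    intro d
    rw [pvLsb]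
    by_cases hm : m = 0
    · simp [hm]
    · rw [if_neg hm]
      intro hmem
      rcases List.mem_cons.mp hmem with rfl | hmem'
      · omega
      · exact ihm (m / 10) (by omega) d hmem'

lemma pvDigitsLoopA_eq (n : Nat) : ∀ acc, pvDigitsLoopA (n : Int) acc = acc ++ (pvLsb n).map Int.ofNat := by
  induction n using Nat.strong_induction_on with
  | _ n ih =>
    intro acc
    rw [pvDigitsLoopA, pvLsb]
    by_cases h : n = 0
    · simp [h]
    · have h0 : (0 : Int) < (n : Int) := by omega
      rw [dif_pos h0, if_neg h]
      have hm : PySem.Int.mod (n : Int) 10 = ((n % 10 : Nat) : Int) := PySem.Int.mod_natCast n 10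
      have hd : PySem.Int.floordiv (n : Int) 10 = ((n / 10 : Nat) : Int) := PySem.Int.floordiv_natCast n 10
      rw [hm, hd, ih (n / 10) (by omega)]
      simp

lemma pvRevLoopA_mid : ∀ (k : Nat) (m x y : List Int), m.length = k →
    pvRevLoopA (x ++ m ++ y) (x.length : Int) ((x.length : Int) + (m.length : Int) - 1) = x ++ m.reverse ++ y := by
  intro k
  induction k using Nat.strong_induction_on with
  | _ k ih =>
    intro m x y hk
    match m, k, hk with
    | [], _, rfl =>
      rw [pvRevLoopA]
      simp
    | a :: m', k, hk =>
      rcases m'.eq_nil_or_concat with rfl | ⟨mm, b, rfl⟩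
      · -- middle is a singleton [a]: one vacuous swap, then the loop stops
        rw [pvRevLoopA, dif_pos (by simp)]
        have he : ((x.length : Int) + (([a] : List Int).length : Int) - 1) = (x.length : Int) := by simp
        have hget : PySem.List.pyGetD (x ++ [a] ++ y) (x.length : Int) 0 = a := by
          rw [PySem.List.pyGetD_natCast]; simp
        have hset : PySem.List.pySetD (x ++ [a] ++ y) (x.length : Int) a = x ++ [a] ++ y := by
          rw [PySem.List.pySetD_natCast, List.append_assoc, List.set_append, if_neg (by omega)]
          simp
        simp only [he, hget, hset]
        rw [pvRevLoopA, dif_neg (by omega)]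
        simp
      · -- middle is a :: mm ++ [b]: swap the ends, recurse on mm
        simp only [List.concat_eq_append] at hk ⊢
        have hxs : x ++ (a :: (mm ++ [b])) ++ y = (x ++ a :: mm) ++ ([b] ++ y) := by simp
        have hidxe : ((x.length : Int) + ((a :: (mm ++ [b]) : List Int).length : Int) - 1)
            = ((x.length + (mm.length + 1) : Nat) : Int) := by
          simp only [List.length_cons, List.length_append, List.length_nil]
          push_cast; ring
        have hgs : PySem.List.pyGetD (x ++ (a :: (mm ++ [b])) ++ y) (x.length : Int) 0 = a := by
          rw [PySem.List.pyGetD_natCast]; simp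
        have hge : PySem.List.pyGetD (x ++ (a :: (mm ++ [b])) ++ y)
            ((x.length + (mm.length + 1) : Nat) : Int) 0 = b := by
          rw [PySem.List.pyGetD_natCast, hxs,
              List.getD_append_right _ _ _ _ (by simp only [List.length_append, List.length_cons]; omega)]
          have h2 : x.length + (mm.length + 1) - (x ++ a :: mm).length = 0 := by
            simp only [List.length_append, List.length_cons]; omega
          rw [h2]; simp
        have hset1 : PySem.List.pySetD (x ++ (a :: (mm ++ [b])) ++ y) (x.length : Int) b
            = x ++ (b :: (mm ++ [b])) ++ y := by
          rw [PySem.List.pySetD_natCast, List.append_assoc, List.set_append, if_neg (by omega)]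
          simp
        have hset2 : PySem.List.pySetD (x ++ (b :: (mm ++ [b])) ++ y)
            ((x.length + (mm.length + 1) : Nat) : Int) a = (x ++ [b]) ++ mm ++ ([a] ++ y) := by
          rw [PySem.List.pySetD_natCast]
          have h1 : x ++ (b :: (mm ++ [b])) ++ y = (x ++ b :: mm) ++ ([b] ++ y) := by simp
          rw [h1, List.set_append, if_neg (by simp only [List.length_append, List.length_cons]; omega)]
          have h2 : x.length + (mm.length + 1) - (x ++ b :: mm).length = 0 := by
            simp only [List.length_append, List.length_cons]; omega
          rw [h2]; simp
        rw [pvRevLoopA, dif_pos (by rw [hidxe]; push_cast; omega)]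
        simp only [hidxe, hgs, hge, hset1, hset2]
        have hs' : ((x.length : Int) + 1) = (((x ++ [b] : List Int)).length : Int) := by simp
        have he' : (((x.length + (mm.length + 1) : Nat) : Int) - 1)
            = (((x ++ [b] : List Int)).length : Int) + ((mm : List Int).length : Int) - 1 := by
          simp only [List.length_append, List.length_cons, List.length_nil]
          push_cast; ring
        have hklt : mm.length < k := by
          simp only [List.length_cons, List.length_append, List.length_nil] at hk; omega
        rw [hs', he', ih mm.length hklt mm (x ++ [b]) ([a] ++ y) rfl]
        simp

lemma pvRevLoopA_reverse (xs : List Int) :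
    pvRevLoopA xs 0 ((xs.length : Int) - 1) = xs.reverse := by
  have := pvRevLoopA_mid xs.length xs [] [] rfl
  simpa using this

lemma pvToDigitsCore_eq : ∀ (f n : Nat) (l : List Char), 0 < n → n ≤ f →
    Nat.toDigitsCore 10 f n l = ((pvLsb n).map Nat.digitChar).reverse ++ l := by
  intro f
  induction f with
  | zero => intro n l h1 h2; omega
  | succ f ih =>
    intro n l h1 h2
    rw [Nat.toDigitsCore]
    by_cases h : n / 10 = 0
    · rw [if_pos h, pvLsb, if_neg (by omega), pvLsb, if_pos h]
      simp
    · rw [if_neg h]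
      conv_rhs => rw [pvLsb, if_neg (by omega)]
      rw [ih (n / 10) _ (by omega) (by omega)]
      simp

lemma pvIntOfDigit_digitChar (d : Nat) (h : d < 10) :
    pvIntOfDigit (Nat.digitChar d) = (d : Int) := by
  interval_cases d <;> decide

lemma pvElem_eq (num : Int) :
    pvRevLoopA (pvDigitsLoopA num []) 0 ((PySem.List.len (pvDigitsLoopA num [])) - 1)
      = if 0 < num then (PySem.Int.toChars num).map pvIntOfDigit else [] := by
  by_cases h : 0 < num
  · rw [if_pos h]
    obtain ⟨n, rfl⟩ : ∃ n : Nat, num = (n : Int) := ⟨num.toNat, by omega⟩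
    have hn : 0 < n := by omega
    rw [pvDigitsLoopA_eq n [], List.nil_append, PySem.List.len_eq, pvRevLoopA_reverse]
    have htc : PySem.Int.toChars ((n : Nat) : Int) = ((pvLsb n).map Nat.digitChar).reverse := by
      unfold PySem.Int.toChars
      rw [if_neg (by omega)]
      have ht : ((n : Nat) : Int).toNat = n := by omega
      rw [ht, Nat.toDigits, pvToDigitsCore_eq (n + 1) n [] hn (by omega), List.append_nil]
    rw [htc, ← List.map_reverse, ← List.map_reverse, List.map_map]
    apply List.map_congr_left
    intro d hd
    have hd10 : d < 10 := pvLsb_lt n d (List.mem_reverse.mp hd)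
    simp [Function.comp, pvIntOfDigit_digitChar d hd10]
  · rw [if_neg h]
    rw [pvDigitsLoopA, dif_neg h]
    rw [pvRevLoopA, dif_neg (by simp)]

-- ===== VERDICT (by name: the statement is the Claim_ definition above) =====
theorem extractDigitsFromAnArrayOptimize_spec : Claim_equal_extractDigitsFromAnArrayOptimize := by
  intro arr _
  unfold Spec_extractDigitsFromAnArrayOptimize extractDigitsFromAnArrayOptimize extractDigitsFromAnArrayOptimize_alt
  rw [PySem.List.foldl_append_eq_flatMap
    (fun num => pvRevLoopA (pvDigitsLoopA num []) 0 ((PySem.List.len (pvDigitsLoopA num [])) - 1)) arr []]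
  rw [List.nil_append]
  congr 1
  funext num
  exact pvElem_eq num
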